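-- pv_equiv track=rewrite | github.com/maeglin89273/EEG-ML-Classification | preprocessing/Sampler.py | sampleChannelsStream
-- ===== SOURCE A (Python) =====
-- def sampleChannelsStream(channels, samplingRate):
--     channelNums = sorted(channels.keys())
--     sampledChannels = {channelNum: [] for channelNum in channelNums}
--
--     for (i, channelValues) in enumerate(zip(*(channels[channelNum] for channelNum in channelNums))):
--         if i % samplingRate == 0:
--             for (i, channelNum) in enumerate(channelNums):
--                 sampledChannels[channelNum].append(channelValues[i])
--
--     return sampledChannels
-- ===== SOURCE B (Python) =====
-- def sampleChannelsStream(channels, samplingRate):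
--     if not channels:
--         return {}
--     channelNums = sorted(channels.keys())
--     minLen = min(len(channels[c]) for c in channelNums)
--     return {c: [channels[c][i] for i in range(minLen) if i % samplingRate == 0]
--             for c in channelNums}
-- ===== Notes on version B (the rewrite author's own statement) =====
-- stated objective: simpler
-- what changed: B drops the zip-transpose and the dict-of-accumulators append loops entirely: it computes the common minimum length once and builds each channel's downsampled list directly with one per-channel comprehension over range(minLen).
import Mathlib
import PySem

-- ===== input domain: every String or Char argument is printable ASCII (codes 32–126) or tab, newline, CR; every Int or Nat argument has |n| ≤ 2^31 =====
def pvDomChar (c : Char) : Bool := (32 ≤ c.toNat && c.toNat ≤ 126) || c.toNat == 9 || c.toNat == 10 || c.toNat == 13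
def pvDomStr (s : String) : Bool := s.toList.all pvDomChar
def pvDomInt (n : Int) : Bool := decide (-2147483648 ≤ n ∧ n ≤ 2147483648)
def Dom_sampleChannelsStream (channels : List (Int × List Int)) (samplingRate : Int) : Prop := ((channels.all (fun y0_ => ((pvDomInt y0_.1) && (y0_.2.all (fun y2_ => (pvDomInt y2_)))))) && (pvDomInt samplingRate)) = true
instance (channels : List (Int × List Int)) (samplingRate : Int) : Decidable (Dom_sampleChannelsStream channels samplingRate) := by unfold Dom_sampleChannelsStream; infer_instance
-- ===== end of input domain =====

-- B replaces A's zip-transpose plus dict-of-accumulators append loops by one direct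
-- per-channel comprehension over range(minLen) (objective: simpler).

-- ===== PORT A =====
-- zip(*iterables) over lists of Ints: rows up to the minimum length (exact port of the builtin)
def pyZipRows (ls : List (List Int)) : List (List Int) :=
  (List.range (((ls.map List.length).min?).getD 0)).map (fun i => ls.map (fun l => l.getD i 0))

def sampleChannelsStream (channels : List (Int × List Int)) (samplingRate : Int) : List (Int × List Int) :=
  let d := PySem.Dict.ofList channels
  let channelNums := PySem.List.sorted d.keys (fun x => x)
  let sampled0 : PySem.Dict Int (List Int) :=
    channelNums.foldl (fun s k => s.insert k []) PySem.Dict.empty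
  let rows := pyZipRows (channelNums.map (fun k => d.getD k []))
  -- channels[channelNum] is d.getD k [] (KeyError impossible: k ranges over the keys);
  -- channelValues[i] is PySem.List.pyGetD (in range: the row has one entry per channel)
  let final := (PySem.List.enumerate rows).foldl
    (fun s p =>
      if PySem.Int.mod p.1 samplingRate == 0 then
        (PySem.List.enumerate channelNums).foldl
          (fun s q => s.modify q.2 [] (fun l => l ++ [PySem.List.pyGetD p.2 q.1 0])) s
      else s) sampled0
  final.items

-- ===== PORT B =====
def sampleChannelsStream_alt (channels : List (Int × List Int)) (samplingRate : Int) : List (Int × List Int) :=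
  if channels.isEmpty then []
  else
    let d := PySem.Dict.ofList channels
    let channelNums := PySem.List.sorted d.keys (fun x => x)
    let minLen := ((channelNums.map (fun c => (d.getD c []).length)).min?).getD 0
    channelNums.map (fun c =>
      (c, ((List.range minLen).filter (fun i : Nat => PySem.Int.mod (i : Int) samplingRate == 0)).map
            (fun i => (d.getD c []).getD i 0)))

-- ===== PRECONDITION & SPEC =====
-- Pre_ excludes exactly the inputs where Python A raises ZeroDivisionError: samplingRate == 0
-- while the zipped stream is non-empty (channels non-empty and no dict value empty).
def Pre_sampleChannelsStream (channels : List (Int × List Int)) (samplingRate : Int) : Prop :=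
  samplingRate ≠ 0 ∨ channels = [] ∨ [] ∈ (PySem.Dict.ofList channels).values
instance (channels : List (Int × List Int)) (samplingRate : Int) : Decidable (Pre_sampleChannelsStream channels samplingRate) := by unfold Pre_sampleChannelsStream; infer_instance

def pvWitness_sampleChannelsStream : (List (Int × List Int)) × Int := ([(2, [4, 5, 6, 7]), (1, [8, 9, 10])], 2)

def Spec_sampleChannelsStream (channels : List (Int × List Int)) (samplingRate : Int) (out : List (Int × List Int)) : Prop := out = sampleChannelsStream_alt channels samplingRate
instance (channels : List (Int × List Int)) (samplingRate : Int) (out : List (Int × List Int)) : Decidable (Spec_sampleChannelsStream channels samplingRate out) := by unfold Spec_sampleChannelsStream; infer_instance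

-- ===== CLAIM (what is proved, stated in full; the proofs are below) =====
def Claim_equal_sampleChannelsStream : Prop := ∀ (channels : List (Int × List Int)) (samplingRate : Int), Dom_sampleChannelsStream channels samplingRate → Pre_sampleChannelsStream channels samplingRate → Spec_sampleChannelsStream channels samplingRate (sampleChannelsStream channels samplingRate)

-- ===== LEMMAS AND PROOFS =====

-- Set.add of a present element is a no-op
theorem pv_set_add_mem {s : List Int} {x : Int} (h : x ∈ s) : PySem.Set.add s x = s := by
  simp [PySem.Set.add, PySem.Set.contains, h]

-- Set.update by elements already present is a no-op
theorem pv_set_update_mem {s xs : List Int} (h : ∀ x ∈ xs, x ∈ s) : PySem.Set.update s xs = s := by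
  induction xs with
  | nil => rfl
  | cons x xs ih =>
    simp only [PySem.Set.update, List.foldl_cons] at *
    rw [pv_set_add_mem (h x (by simp))]
    exact ih (fun y hy => h y (by simp [hy]))

-- inner append loop leaves getD at an untouched key unchanged
theorem pv_inner_getD_ne (row : List Int) (l : List (Int × Int)) (k : Int)
    (h : ∀ q ∈ l, q.2 ≠ k) (s : PySem.Dict Int (List Int)) :
    (l.foldl (fun s q => s.modify q.2 [] (fun v => v ++ [PySem.List.pyGetD row q.1 0])) s).getD k []
      = s.getD k [] := by
  induction l generalizing s with
  | nil => rfl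
  | cons q l ih =>
    simp only [List.foldl_cons]
    rw [ih (fun p hp => h p (List.mem_cons_of_mem _ hp))]
    exact PySem.Dict.getD_modify_of_ne _ _ _ (h q List.mem_cons_self).symm

-- inner append loop: pointwise effect at the j-th (distinct) key
theorem pv_inner_getD (row : List Int) :
    ∀ (ks : List Int), ks.Nodup → ∀ (i0 : Int) (s : PySem.Dict Int (List Int)) (j : Nat)
      (hj : j < ks.length),
    ((PySem.List.enumerate ks i0).foldl
        (fun s q => s.modify q.2 [] (fun v => v ++ [PySem.List.pyGetD row q.1 0])) s).getD ks[j] []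
      = s.getD ks[j] [] ++ [PySem.List.pyGetD row (i0 + (j : Int)) 0] := by
  intro ks
  induction ks with
  | nil => intro _ i0 s j hj; simp at hj
  | cons k t ih =>
    intro hnd i0 s j hj
    obtain ⟨hkt, hndt⟩ := List.nodup_cons.mp hnd
    rw [PySem.List.enumerate_cons, List.foldl_cons]
    rcases j with _ | j
    · have hk : ∀ q ∈ PySem.List.enumerate t (i0 + 1), q.2 ≠ k := by
        intro q hq
        rw [PySem.List.mem_enumerate_iff] at hq
        obtain ⟨m, hm, rfl⟩ := hq
        intro hql
        exact hkt (hql ▸ t.getElem_mem hm)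
      simp only [List.getElem_cons_zero]
      rw [pv_inner_getD_ne row _ k hk]
      simp [PySem.Dict.getD_modify_self]
    · have hj' : j < t.length := by simpa using hj
      simp only [List.getElem_cons_succ]
      rw [ih hndt (i0 + 1) _ j hj']
      have hne : t[j] ≠ k := fun h => hkt (h ▸ t.getElem_mem hj')
      rw [PySem.Dict.getD_modify_of_ne _ _ _ hne]
      congr 3
      push_cast
      ring

-- inner append loop keeps the key list when all touched keys are present
theorem pv_inner_keys (row : List Int) (ks : List Int) (i0 : Int)
    (s : PySem.Dict Int (List Int)) (h : ∀ k ∈ ks, k ∈ s.keys) :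
    ((PySem.List.enumerate ks i0).foldl
        (fun s q => s.modify q.2 [] (fun v => v ++ [PySem.List.pyGetD row q.1 0])) s).keys = s.keys := by
  have hk := PySem.Dict.keys_foldl_modify_key (PySem.List.enumerate ks i0) (fun q => q.2)
    ([] : List Int) (fun _ q => fun v => v ++ [PySem.List.pyGetD row q.1 0]) s
  rw [PySem.List.map_snd_enumerate] at hk
  rw [hk]
  exact pv_set_update_mem h

-- outer loop keeps the key list
theorem pv_outer_keys (r : Int) (ks : List Int) (rs : List (Int × List Int))
    (s : PySem.Dict Int (List Int)) (h : s.keys = ks) :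
    (rs.foldl (fun s p =>
        if PySem.Int.mod p.1 r == 0 then
          (PySem.List.enumerate ks).foldl
            (fun s q => s.modify q.2 [] (fun v => v ++ [PySem.List.pyGetD p.2 q.1 0])) s
        else s) s).keys = ks := by
  induction rs generalizing s with
  | nil => exact h
  | cons p rs ih =>
    rw [List.foldl_cons]
    apply ih
    by_cases hp : PySem.Int.mod p.1 r == 0
    · simp only [hp, if_true]
      rw [pv_inner_keys p.2 ks 0 s (fun k hk => h ▸ hk)]
      exact h
    · simp only [hp]
      exact h

-- outer loop, pointwise at the j-th key, over the first n rows of the column formula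
theorem pv_outer_getD (r : Int) (ks : List Int) (hnd : ks.Nodup) (vf : Int → List Int)
    (n : Nat) (s0 : PySem.Dict Int (List Int)) (j : Nat) (hj : j < ks.length) :
    ((PySem.List.enumerate ((List.range n).map (fun i => (ks.map vf).map (fun l => l.getD i 0)))).foldl
        (fun s p =>
          if PySem.Int.mod p.1 r == 0 then
            (PySem.List.enumerate ks).foldl
              (fun s q => s.modify q.2 [] (fun v => v ++ [PySem.List.pyGetD p.2 q.1 0])) s
          else s) s0).getD ks[j] []
      = s0.getD ks[j] []
        ++ ((List.range n).filter (fun i : Nat => PySem.Int.mod (i : Int) r == 0)).map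
             (fun i => (vf ks[j]).getD i 0) := by
  induction n with
  | zero => simp
  | succ n ih =>
    rw [List.range_succ, List.map_append, PySem.List.enumerate_append, List.foldl_append]
    simp only [List.map_cons, List.map_nil, PySem.List.enumerate_cons, PySem.List.enumerate_nil,
      List.foldl_cons, List.foldl_nil, List.length_map, List.length_range, zero_add]
    rw [List.filter_append]
    by_cases hP : PySem.Int.mod ((n : Int)) r == 0
    · simp only [hP, if_true]
      rw [pv_inner_getD _ ks hnd 0 _ j hj, ih]
      have hfil : List.filter (fun i : Nat => PySem.Int.mod (i : Int) r == 0) [n] = [n] := by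
        simp [List.filter, hP]
      rw [hfil, List.map_append, List.append_assoc]
      congr 2
      simp only [List.map_cons, List.map_nil, List.cons.injEq, and_true]
      rw [show (0 : Int) + (j : Int) = ((j : Nat) : Int) by ring, PySem.List.pyGetD_natCast]
      rw [List.getD_eq_getElem?_getD, List.getD_eq_getElem?_getD, List.getElem?_map,
        List.getElem?_map, List.getElem?_eq_getElem hj]
      simp [List.getD_eq_getElem?_getD]
    · simp only [hP, Bool.false_eq_true, if_false]
      have hfil : List.filter (fun i : Nat => PySem.Int.mod (i : Int) r == 0) [n] = [] := by
        simp [List.filter, hP]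
      rw [hfil, List.append_nil]
      simpa using ih

-- ===== VERDICT (by name: the statement is the Claim_ definition above) =====
theorem sampleChannelsStream_spec : Claim_equal_sampleChannelsStream := by
  unfold Claim_equal_sampleChannelsStream
  intro channels r _ _
  unfold Spec_sampleChannelsStream
  by_cases hch : channels = []
  · subst hch; rfl
  · have hne : channels.isEmpty = false := by simpa [List.isEmpty_iff] using hch
    unfold sampleChannelsStream sampleChannelsStream_alt
    simp only [hne, Bool.false_eq_true, if_false, pyZipRows]
    set d := PySem.Dict.ofList channels with hd
    set ks := PySem.List.sorted d.keys (fun x => x) with hks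
    have hnd : ks.Nodup :=
      ((PySem.List.sorted_perm d.keys (fun x => x) false).nodup_iff).mpr
        (PySem.Dict.nodup_keys_ofList channels)
    set sam0 := ks.foldl (fun s k => s.insert k ([] : List Int)) PySem.Dict.empty with hsam0
    have h0items : sam0.items = ks.map (fun k => (k, ([] : List Int))) := by
      have hf := PySem.Dict.items_foldl_insert_fresh ks (fun k => k) (fun _ => ([] : List Int))
        (PySem.Dict.empty : PySem.Dict Int (List Int)) (by intro a _; simp) (by simpa using hnd)
      simpa using hf
    have h0keys : sam0.keys = ks := by
      have hid : ((fun x : Int × List Int => x.1) ∘ fun k : Int => (k, ([] : List Int))) = id := rfl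
      simp [PySem.Dict.keys, h0items, hid]
    have h0nd : sam0.keys.Nodup := by rw [h0keys]; exact hnd
    have h0getD : ∀ j (hj : j < ks.length), sam0.getD ks[j] [] = [] := by
      intro j hj
      exact PySem.Dict.getD_of_mem_items sam0
        (by rw [h0items]; exact List.mem_map.mpr ⟨ks[j], List.getElem_mem hj, rfl⟩) h0nd []
    have hn : (List.map (fun c : Int => (d.getD c []).length) ks).min?.getD 0
        = (List.map List.length (List.map (fun k : Int => d.getD k []) ks)).min?.getD 0 := by
      rw [List.map_map]; rfl
    rw [hn]
    have hfk := pv_outer_keys r ks (PySem.List.enumerate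
        (List.map (fun i => List.map (fun l => l.getD i 0) (List.map (fun k => d.getD k []) ks))
          (List.range ((List.map List.length (List.map (fun k : Int => d.getD k []) ks)).min?.getD 0))))
        sam0 h0keys
    rw [PySem.Dict.items_eq_map_keys _ (by rw [hfk]; exact hnd) ([] : List Int), hfk]
    apply List.ext_getElem (by simp)
    intro j h1 h2
    have hj : j < ks.length := by simpa using h1
    simp only [List.getElem_map]
    rw [pv_outer_getD r ks hnd (fun k => d.getD k [])
        ((List.map List.length (List.map (fun k : Int => d.getD k []) ks)).min?.getD 0) sam0 j hj,
      h0getD j hj]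
    simp
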